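-- pv_equiv track=rewrite | github.com/MaanavS16/Kattis | pizza.py | process
-- ===== SOURCE A (Python) =====
-- def delrepeats(x):
--     y = []
--     for i in x:
--         if i not in y:
--             y.append(i)
--     return y
--
-- def process(x):
--     r = x[0]
--     r2 = []
--     for i in range(1, len(x)):
--         x2 = filter(lambda z: z in r, x[i])
--         for j in x2:
--             r2.append(j)
--     r = filter(lambda z: z in r2, r)
--     return delrepeats(r)
-- ===== SOURCE B (Python) =====
-- def process(x):
--     rest = x[1:]
--     seen = []
--     res = []
--     for e in x[0]:
--         if e in seen:
--             continue
--         seen.append(e)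
--         if any(e in lst for lst in rest):
--             res.append(e)
--     return res
-- ===== Notes on version B (the rewrite author's own statement) =====
-- stated objective: faster
-- what changed: One pass over x[0] with a seen list and a short-circuiting any() over the other lists, instead of A's intermediate r2 table (all matching elements of the other lists, duplicates included) which A then rescans linearly for every element of x[0] before a separate dedup pass.
import Mathlib
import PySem

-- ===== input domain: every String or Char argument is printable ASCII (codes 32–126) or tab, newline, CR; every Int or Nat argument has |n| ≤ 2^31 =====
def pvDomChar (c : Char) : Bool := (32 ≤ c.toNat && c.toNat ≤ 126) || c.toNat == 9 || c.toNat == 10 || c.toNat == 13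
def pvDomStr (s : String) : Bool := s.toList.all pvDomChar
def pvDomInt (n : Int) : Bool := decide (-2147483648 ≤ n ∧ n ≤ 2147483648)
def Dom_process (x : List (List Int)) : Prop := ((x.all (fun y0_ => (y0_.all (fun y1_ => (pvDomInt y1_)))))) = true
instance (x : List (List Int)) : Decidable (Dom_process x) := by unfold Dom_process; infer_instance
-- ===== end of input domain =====

-- B replaces A's intermediate r2 table + second filter pass + dedup helper by one pass
-- over x[0] with a seen list and a short-circuiting any-search over the other lists (objective: simpler).


-- ===== PORT A =====
-- delrepeats: y = []; for i in x: if i not in y: y.append(i)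
def delrepeats (x : List Int) : List Int :=
  x.foldl (fun y i => if y.contains i then y else y ++ [i]) []

-- process: r = x[0]; r2 accumulated over range(1, len(x)) from filter(z in r, x[i]);
-- then filter r by membership in r2 and delrepeats.  (x[0] on x = [] raises: Pre_ excludes it.)
def process (x : List (List Int)) : List Int :=
  let r := x.headD []
  let r2 := (PySem.List.pyRange 1 (x.length : Int) 1).foldl
      (fun r2 i => r2 ++ (PySem.List.pyGetD x i []).filter (fun z => r.contains z)) []
  delrepeats (r.filter (fun z => r2.contains z))

-- ===== PORT B =====
-- rest = x[1:]; one pass over x[0] with (seen, res); append e to res iff unseen and in some rest list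
def process_alt (x : List (List Int)) : List Int :=
  let rest := x.drop 1  -- x[1:]
  ((x.headD []).foldl
    (fun (p : List Int × List Int) e =>
      if p.1.contains e then p
      else (p.1 ++ [e], if rest.any (fun lst => lst.contains e) then p.2 ++ [e] else p.2))
    ([], [])).2

-- ===== PRECONDITION & SPEC =====
-- Pre_ excludes only x = [], on which both A and B raise IndexError at x[0].
def Pre_process (x : List (List Int)) : Prop := x ≠ []
instance (x : List (List Int)) : Decidable (Pre_process x) := by unfold Pre_process; infer_instance
def pvWitness_process : List (List Int) := [[1, 2, 2, 3], [2, 3], [3, 4]]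

def Spec_process (x : List (List Int)) (out : List Int) : Prop := out = process_alt x
instance (x : List (List Int)) (out : List Int) : Decidable (Spec_process x out) := by unfold Spec_process; infer_instance

-- ===== CLAIM (what is proved, stated in full; the proofs are below) =====
def Claim_equal_process : Prop := ∀ (x : List (List Int)), Dom_process x → Pre_process x → Spec_process x (process x)

-- ===== LEMMAS AND PROOFS =====

-- A's r2 loop over indices 1..len(x) is the fold over the tail lists.
lemma r2_eq (r : List Int) (t : List (List Int)) :
    (PySem.List.pyRange 1 ((r :: t).length : Int) 1).foldl
      (fun r2 i => r2 ++ (PySem.List.pyGetD (r :: t) i []).filter (fun z => r.contains z)) []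
    = t.flatMap (fun lst => lst.filter (fun z => r.contains z)) := by
  rw [PySem.List.foldl_pyRange_pyGetD' (r :: t) []
        (fun r2 lst => r2 ++ lst.filter (fun z => r.contains z)) [] (by norm_num : (0:Int) ≤ 1)]
  simp [List.flatMap_def]

-- membership in r2 for e ∈ r
lemma mem_r2 (r : List Int) (t : List (List Int)) (e : Int) (he : e ∈ r) :
    ((t.flatMap (fun lst => lst.filter (fun z => r.contains z))).contains e)
      = t.any (fun lst => lst.contains e) := by
  rw [Bool.eq_iff_iff]
  simp [List.mem_flatMap, List.mem_filter, List.any_eq_true, he]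

-- core loop correspondence: B's one-pass fold equals A's dedup of the filtered list,
-- under the invariant relating B's seen to A's accumulator on elements satisfying q.
lemma loop_eq (q : Int → Bool) :
    ∀ (l seen y : List Int),
      (∀ e, e ∈ l → q e = true → (seen.contains e = y.contains e)) →
      (l.foldl
        (fun (p : List Int × List Int) e =>
          if p.1.contains e then p
          else (p.1 ++ [e], if q e then p.2 ++ [e] else p.2)) (seen, y)).2
      = (l.filter q).foldl (fun y i => if y.contains i then y else y ++ [i]) y := by
  intro l
  induction l with
  | nil => intro seen y _; simp
  | cons e l ih =>
    intro seen y hinv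
    by_cases hq : q e = true
    · rw [List.foldl_cons, List.filter_cons_of_pos hq]
      by_cases hs : seen.contains e = true
      · have hy : y.contains e = true := (hinv e (by simp) hq) ▸ hs
        simp only [hs, if_true, List.foldl_cons, hy, if_true]
        exact ih seen y (fun e' he' hq' => hinv e' (by simp [he']) hq')
      · have hy : y.contains e = false := by
          have := hinv e (by simp) hq; rw [← this]; simpa using hs
        simp only [hs, hq, if_true, List.foldl_cons, hy, Bool.false_eq_true, if_false]
        apply ih
        intro e' he' hq'
        rw [List.contains_append, List.contains_append, hinv e' (by simp [he']) hq']
    · rw [List.foldl_cons, List.filter_cons_of_neg (by simpa using hq)]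
      by_cases hs : seen.contains e = true
      · simp only [hs, if_true]
        exact ih seen y (fun e' he' hq' => hinv e' (by simp [he']) hq')
      · simp only [hs, hq, Bool.false_eq_true, if_false]
        apply ih
        intro e' he' hq'
        have hne : e' ≠ e := fun h => by rw [h] at hq'; exact hq (by simpa using hq')
        rw [List.contains_append, hinv e' (by simp [he']) hq']
        simp [hne]

-- ===== VERDICT (by name: the statement is the Claim_ definition above) =====
theorem process_spec : Claim_equal_process := by
  intro x _ hpre
  unfold Spec_process
  obtain ⟨r, t, rfl⟩ : ∃ r t, x = r :: t := by
    cases x with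
    | nil => exact absurd rfl hpre
    | cons r t => exact ⟨r, t, rfl⟩
  unfold process process_alt delrepeats
  simp only [List.headD_cons, List.drop_one, List.tail_cons]
  rw [r2_eq]
  rw [loop_eq (fun e => t.any (fun lst => lst.contains e)) r [] [] (by intro e _ _; rfl)]
  congr 1
  apply List.filter_congr
  intro e he
  exact mem_r2 r t e he
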